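-- pv_equiv track=rewrite | github.com/mohammadfaiizan/ProjectI | DSA/Problem/Dynamic Programming/11_Game_Theory_DP/375_Guess_Number_Higher_or_Lower_II.py | guess_number_higher_lower_memoization
-- ===== SOURCE A (Python) =====
-- def guess_number_higher_lower_memoization(n):
--     """
--     MEMOIZATION APPROACH:
--     ====================
--     Use memoization to cache computed ranges.
--
--     Time Complexity: O(n^3) - n^2 states, n choices per state
--     Space Complexity: O(n^2) - memoization table
--     """
--     memo = {}
--
--     def min_cost(start, end):
--         if start >= end:
--             return 0
--
--         if (start, end) in memo:
--             return memo[(start, end)]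
--
--         min_worst_cost = float('inf')
--
--         for guess in range(start, end + 1):
--             left_cost = min_cost(start, guess - 1)
--             right_cost = min_cost(guess + 1, end)
--             worst_case_cost = guess + max(left_cost, right_cost)
--             min_worst_cost = min(min_worst_cost, worst_case_cost)
--
--         memo[(start, end)] = min_worst_cost
--         return min_worst_cost
--
--     return min_cost(1, n)
-- ===== SOURCE B (Python) =====
-- def guess_number_higher_lower_memoization(n):
--     # Bottom-up tabulation over interval lengths (no recursion, no memo dict
--     # probing): dp maps (i, j) with i < j to the min worst-case cost of [i, j];
--     # single-number and empty intervals cost 0 and are never stored.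
--     dp = {}
--     for length in range(2, n + 1):
--         for i in range(1, n - length + 2):
--             j = i + length - 1
--             best = None
--             for g in range(i, j + 1):
--                 w = g + max(dp.get((i, g - 1), 0), dp.get((g + 1, j), 0))
--                 if best is None or w < best:
--                     best = w
--             dp[(i, j)] = best
--     return dp.get((1, n), 0)
-- ===== Notes on version B (the rewrite author's own statement) =====
-- stated objective: alternative
-- what changed: Replaced the top-down memoized recursion (dict probed per call, recursion depth about n) with a bottom-up iterative tabulation over interval lengths that never recurses; Pre_ excludes only the inputs on which A raises RecursionError.
import Mathlib
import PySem

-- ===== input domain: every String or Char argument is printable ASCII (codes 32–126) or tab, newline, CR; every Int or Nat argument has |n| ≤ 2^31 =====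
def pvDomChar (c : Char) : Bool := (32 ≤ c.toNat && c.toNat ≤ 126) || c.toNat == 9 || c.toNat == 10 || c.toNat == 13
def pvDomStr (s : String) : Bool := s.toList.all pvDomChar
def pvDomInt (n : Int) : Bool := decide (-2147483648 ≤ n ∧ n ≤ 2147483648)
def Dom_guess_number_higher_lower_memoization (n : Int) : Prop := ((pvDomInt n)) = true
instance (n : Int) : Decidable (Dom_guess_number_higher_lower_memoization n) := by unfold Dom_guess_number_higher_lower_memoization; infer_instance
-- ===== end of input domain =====

-- B replaces A's top-down memoized recursion by a bottom-up tabulation over interval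
-- lengths (no recursion, no memo probing); same return value for every n.

-- ===== PORT A =====
-- fuel is only a totality guard (one unit per min_cost call along a chain of nested
-- intervals; the interval shrinks each call, so (n-1).toNat+1 units are never exhausted).
def minCostA (fuel : Nat) (s e : Int) (memo : Std.HashMap (Int × Int) Int) :
    Int × Std.HashMap (Int × Int) Int :=
  match fuel with
  | 0 => (0, memo)
  | fuel + 1 =>
    if s ≥ e then (0, memo)
    else
      match memo[(s, e)]? with
      | some v => (v, memo)
      | none =>
        let r := (PySem.List.pyRange s (e + 1) 1).foldl
          (fun (acc : Option Int × Std.HashMap (Int × Int) Int) g =>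
            let lc := minCostA fuel s (g - 1) acc.2
            let rc := minCostA fuel (g + 1) e lc.2
            let w := g + max lc.1 rc.1
            ((match acc.1 with
              | none => some w
              | some m => some (min m w)), rc.2))
          (none, memo)
        match r.1 with
        | some m => (m, r.2.insert (s, e) m)
        | none => (0, memo)   -- unreachable: the guess range is nonempty when s < e

def guess_number_higher_lower_memoization (n : Int) : Int :=
  (minCostA ((n - 1).toNat + 1) 1 n (∅ : Std.HashMap (Int × Int) Int)).1

-- ===== PORT B =====
-- inner 'for g' loop of Source B
def altBest (dp : Std.HashMap (Int × Int) Int) (i j : Int) : Option Int :=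
  (PySem.List.pyRange i (j + 1) 1).foldl
    (fun acc g =>
      let w := g + max (dp.getD (i, g - 1) 0) (dp.getD (g + 1, j) 0)
      match acc with
      | none => some w
      | some b => if w < b then some w else some b)
    none

def guess_number_higher_lower_memoization_alt (n : Int) : Int :=
  let dp := (PySem.List.pyRange 2 (n + 1) 1).foldl
    (fun dp len =>
      (PySem.List.pyRange 1 (n - len + 2) 1).foldl
        (fun dp i =>
          let j := i + len - 1
          match altBest dp i j with
          | some b => dp.insert (i, j) b
          | none => dp)   -- unreachable: the guess range i..j is nonempty
        dp)
    (∅ : Std.HashMap (Int × Int) Int)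
  dp.getD (1, n) 0

-- ===== PRECONDITION & SPEC =====
-- Pre_ excludes exactly the inputs above the bound below: there A's recursion (depth about n)
-- exceeds CPython's default recursion limit and A raises RecursionError; A returns on every n inside Pre_.
def Pre_guess_number_higher_lower_memoization (n : Int) : Prop := n ≤ 997
instance (n : Int) : Decidable (Pre_guess_number_higher_lower_memoization n) := by unfold Pre_guess_number_higher_lower_memoization; infer_instance
def pvWitness_guess_number_higher_lower_memoization : Int := 10
def Spec_guess_number_higher_lower_memoization (n : Int) (out : Int) : Prop := out = guess_number_higher_lower_memoization_alt n
instance (n : Int) (out : Int) : Decidable (Spec_guess_number_higher_lower_memoization n out) := by unfold Spec_guess_number_higher_lower_memoization; infer_instance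

-- ===== CLAIM (what is proved, stated in full; the proofs are below) =====
def Claim_equal_guess_number_higher_lower_memoization : Prop := ∀ (n : Int), Dom_guess_number_higher_lower_memoization n → Pre_guess_number_higher_lower_memoization n → Spec_guess_number_higher_lower_memoization n (guess_number_higher_lower_memoization n)

-- ===== LEMMAS AND PROOFS =====

-- Pure reference function: min worst-case cost of the interval [s, e], fueled.
def fP : Nat → Int → Int → Int
  | 0, _, _ => 0
  | fuel + 1, s, e =>
    if s ≥ e then 0
    else
      match (PySem.List.pyRange s (e + 1) 1).foldl
        (fun acc g =>
          match acc with
          | none => some (g + max (fP fuel s (g - 1)) (fP fuel (g + 1) e))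
          | some m => some (min m (g + max (fP fuel s (g - 1)) (fP fuel (g + 1) e)))) none with
      | some m => m
      | none => 0

def F (s e : Int) : Int := fP (e - s).toNat s e

def wF (s e g : Int) : Int := g + max (F s (g - 1)) (F (g + 1) e)

def pstep (s e : Int) (acc : Option Int) (g : Int) : Option Int :=
  match acc with
  | none => some (wF s e g)
  | some m => some (min m (wF s e g))

lemma fP_of_ge (fuel : Nat) (s e : Int) (h : e ≤ s) : fP fuel s e = 0 := by
  cases fuel with
  | zero => rfl
  | succ k => simp only [fP, if_pos (by omega : s ≥ e)]

lemma F_of_ge (s e : Int) (h : e ≤ s) : F s e = 0 := by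
  exact fP_of_ge _ _ _ h

lemma fP_stab : ∀ fuel : Nat, ∀ s e : Int, (e - s).toNat ≤ fuel → fP fuel s e = F s e := by
  intro fuel
  induction fuel using Nat.strong_induction_on with
  | _ fuel IH =>
    intro s e hf
    by_cases hse : e ≤ s
    · rw [fP_of_ge _ _ _ hse, F_of_ge _ _ hse]
    · push Not at hse
      obtain ⟨k, hk⟩ : ∃ k, fuel = k + 1 := ⟨fuel - 1, by omega⟩
      obtain ⟨m, hm⟩ : ∃ m, (e - s).toNat = m + 1 := ⟨(e - s).toNat - 1, by omega⟩
      have hfold : ∀ u : Nat, m ≤ u → u < fuel →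
          (PySem.List.pyRange s (e + 1) 1).foldl
            (fun acc g =>
              match acc with
              | none => some (g + max (fP u s (g - 1)) (fP u (g + 1) e))
              | some mm => some (min mm (g + max (fP u s (g - 1)) (fP u (g + 1) e)))) none
          = (PySem.List.pyRange s (e + 1) 1).foldl (pstep s e) none := by
        intro u hmu hu
        apply PySem.List.foldl_congr_mem
        intro acc g hg
        rw [PySem.List.mem_pyRange_one] at hg
        have hL : fP u s (g - 1) = F s (g - 1) := IH u hu s (g - 1) (by omega)
        have hR : fP u (g + 1) e = F (g + 1) e := IH u hu (g + 1) e (by omega)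
        simp only [pstep, wF, hL, hR]
      subst hk
      rw [F, hm]
      show fP (k + 1) s e = fP (m + 1) s e
      simp only [fP, if_neg (by omega : ¬ s ≥ e)]
      rw [hfold k (by omega) (by omega), hfold m (by omega) (by omega)]

lemma F_eq_fold (s e : Int) (h : s < e) :
    F s e = (match (PySem.List.pyRange s (e + 1) 1).foldl (pstep s e) none with
      | some m => m
      | none => 0) := by
  obtain ⟨m, hm⟩ : ∃ m, (e - s).toNat = m + 1 := ⟨(e - s).toNat - 1, by omega⟩
  rw [F, hm]
  simp only [fP, if_neg (by omega : ¬ s ≥ e)]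
  have hfold : (PySem.List.pyRange s (e + 1) 1).foldl
      (fun acc g =>
        match acc with
        | none => some (g + max (fP m s (g - 1)) (fP m (g + 1) e))
        | some mm => some (min mm (g + max (fP m s (g - 1)) (fP m (g + 1) e)))) none
      = (PySem.List.pyRange s (e + 1) 1).foldl (pstep s e) none := by
    apply PySem.List.foldl_congr_mem
    intro acc g hg
    rw [PySem.List.mem_pyRange_one] at hg
    have hL : fP m s (g - 1) = F s (g - 1) := fP_stab m s (g - 1) (by omega)
    have hR : fP m (g + 1) e = F (g + 1) e := fP_stab m (g + 1) e (by omega)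
    simp only [pstep, wF, hL, hR]
  rw [hfold]

lemma fold_pstep_some (s e : Int) :
    ∀ (l : List Int) (m : Int), ∃ m', l.foldl (pstep s e) (some m) = some m' := by
  intro l
  induction l with
  | nil => intro m; exact ⟨m, rfl⟩
  | cons a t ih =>
    intro m
    simpa only [List.foldl_cons, pstep] using ih (min m (wF s e a))

lemma F_fold_some (s e : Int) (h : s < e) :
    (PySem.List.pyRange s (e + 1) 1).foldl (pstep s e) none = some (F s e) := by
  have hcons := PySem.List.pyRange_one_cons (a := s) (b := e + 1) (by omega)
  have hsome : ∃ m', (PySem.List.pyRange s (e + 1) 1).foldl (pstep s e) none = some m' := by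
    rw [hcons, List.foldl_cons]
    exact fold_pstep_some s e _ _
  obtain ⟨m', hm'⟩ := hsome
  rw [hm']
  have := F_eq_fold s e h
  rw [hm'] at this
  simp only [this]

-- A-side: memo invariant
def GoodA (memo : Std.HashMap (Int × Int) Int) : Prop :=
  ∀ a b v, memo[(a, b)]? = some v → v = F a b

lemma A_main : ∀ fuel : Nat, ∀ (s e : Int) (memo : Std.HashMap (Int × Int) Int),
    GoodA memo → (e - s).toNat < fuel →
    (minCostA fuel s e memo).1 = F s e ∧ GoodA (minCostA fuel s e memo).2 := by
  intro fuel
  induction fuel using Nat.strong_induction_on with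
  | _ fuel IH =>
    intro s e memo hg hf
    obtain ⟨k, rfl⟩ : ∃ k, fuel = k + 1 := ⟨fuel - 1, by omega⟩
    by_cases hse : s ≥ e
    · simp only [minCostA, if_pos hse]
      exact ⟨(F_of_ge s e (by omega)).symm, hg⟩
    · have hlt : s < e := by omega
      cases hmem : memo[(s, e)]? with
      | some v =>
        simp only [minCostA, if_neg hse, hmem]
        exact ⟨hg s e v hmem, hg⟩
      | none =>
        have aux : ∀ (l : List Int), (∀ g ∈ l, s ≤ g ∧ g ≤ e) →
            ∀ (acc : Option Int) (d : Std.HashMap (Int × Int) Int), GoodA d →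
            ((l.foldl (fun (acc : Option Int × Std.HashMap (Int × Int) Int) g =>
                let lc := minCostA k s (g - 1) acc.2
                let rc := minCostA k (g + 1) e lc.2
                let w := g + max lc.1 rc.1
                ((match acc.1 with
                  | none => some w
                  | some m => some (min m w)), rc.2)) (acc, d)).1
              = l.foldl (pstep s e) acc ∧
             GoodA ((l.foldl (fun (acc : Option Int × Std.HashMap (Int × Int) Int) g =>
                let lc := minCostA k s (g - 1) acc.2
                let rc := minCostA k (g + 1) e lc.2
                let w := g + max lc.1 rc.1
                ((match acc.1 with
                  | none => some w
                  | some m => some (min m w)), rc.2)) (acc, d)).2)) := by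
          intro l
          induction l with
          | nil => intro _ acc d hd; exact ⟨rfl, hd⟩
          | cons a t iht =>
            intro hmems acc d hd
            obtain ⟨ha1, ha2⟩ := hmems a (by simp)
            have hL := IH k (by omega) s (a - 1) d hd (by omega)
            have hR := IH k (by omega) (a + 1) e (minCostA k s (a - 1) d).2 hL.2 (by omega)
            have hstep : (fun (acc : Option Int × Std.HashMap (Int × Int) Int) g =>
                let lc := minCostA k s (g - 1) acc.2
                let rc := minCostA k (g + 1) e lc.2
                let w := g + max lc.1 rc.1
                ((match acc.1 with
                  | none => some w
                  | some m => some (min m w)), rc.2)) (acc, d) a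
                = (pstep s e acc a,
                   (minCostA k (a + 1) e (minCostA k s (a - 1) d).2).2) := by
              cases acc with
              | none => simp only [pstep, wF, hL.1, hR.1]
              | some m => simp only [pstep, wF, hL.1, hR.1]
            simp only [List.foldl_cons, hstep]
            exact iht (fun g hgmem => hmems g (by simp [hgmem])) (pstep s e acc a) _ hR.2
        have hmembers : ∀ g ∈ PySem.List.pyRange s (e + 1) 1, s ≤ g ∧ g ≤ e := by
          intro g hgmem
          rw [PySem.List.mem_pyRange_one] at hgmem
          omega
        have hfold := aux (PySem.List.pyRange s (e + 1) 1) hmembers none memo hg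
        have hval : (PySem.List.pyRange s (e + 1) 1).foldl (pstep s e) none = some (F s e) :=
          F_fold_some s e hlt
        simp only [minCostA, if_neg hse, hmem]
        rw [hfold.1, hval]
        refine ⟨rfl, ?_⟩
        intro a b v hv
        rw [Std.HashMap.getElem?_insert] at hv
        split at hv
        · rename_i heq
          rw [beq_iff_eq] at heq
          cases hv
          have : a = s ∧ b = e := by
            refine ⟨(congrArg Prod.fst heq).symm, (congrArg Prod.snd heq).symm⟩
          rw [this.1, this.2]
        · exact hfold.2 a b v hv

-- B-side invariants
def C1 (dp : Std.HashMap (Int × Int) Int) : Prop :=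
  ∀ a b v, dp[(a, b)]? = some v → v = F a b

def P2 (n : Int) (dp : Std.HashMap (Int × Int) Int) (L : Int) : Prop :=
  ∀ a b, 1 ≤ a → a < b → b ≤ n → b - a + 1 ≤ L → (dp[(a, b)]?).isSome = true

lemma altBest_eq (n : Int) (dp : Std.HashMap (Int × Int) Int) (i j : Int)
    (h1 : 1 ≤ i) (hij : i < j) (hjn : j ≤ n)
    (hc1 : C1 dp)
    (hp : ∀ a b, 1 ≤ a → a < b → b ≤ n → b - a < j - i → (dp[(a, b)]?).isSome = true) :
    altBest dp i j = some (F i j) := by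
  unfold altBest
  have hcong : (PySem.List.pyRange i (j + 1) 1).foldl
      (fun acc g =>
        let w := g + max (dp.getD (i, g - 1) 0) (dp.getD (g + 1, j) 0)
        match acc with
        | none => some w
        | some b => if w < b then some w else some b) none
      = (PySem.List.pyRange i (j + 1) 1).foldl (pstep i j) none := by
    apply PySem.List.foldl_congr_mem
    intro acc g hg
    rw [PySem.List.mem_pyRange_one] at hg
    have hLv : dp.getD (i, g - 1) 0 = F i (g - 1) := by
      cases hq : dp[(i, g - 1)]? with
      | some v =>
        rw [Std.HashMap.getD_eq_getD_getElem?, hq, Option.getD_some]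
        exact hc1 i (g - 1) v hq
      | none =>
        rw [Std.HashMap.getD_eq_getD_getElem?, hq, Option.getD_none]
        by_cases hz : g - 1 ≤ i
        · rw [F_of_ge _ _ hz]
        · have := hp i (g - 1) h1 (by omega) (by omega) (by omega)
          rw [hq] at this
          simp at this
    have hRv : dp.getD (g + 1, j) 0 = F (g + 1) j := by
      cases hq : dp[(g + 1, j)]? with
      | some v =>
        rw [Std.HashMap.getD_eq_getD_getElem?, hq, Option.getD_some]
        exact hc1 (g + 1) j v hq
      | none =>
        rw [Std.HashMap.getD_eq_getD_getElem?, hq, Option.getD_none]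
        by_cases hz : j ≤ g + 1
        · rw [F_of_ge _ _ hz]
        · have := hp (g + 1) j (by omega) (by omega) hjn (by omega)
          rw [hq] at this
          simp at this
    cases acc with
    | none => simp only [pstep, wF, hLv, hRv]
    | some m =>
      simp only [pstep, wF, hLv, hRv]
      rw [min_def]
      split_ifs <;> first | rfl | omega
  rw [hcong, F_fold_some i j hij]

lemma B_iloop (n len : Int) (hlen : 2 ≤ len) :
    ∀ (l : List Int), (∀ i ∈ l, 1 ≤ i ∧ i + len - 1 ≤ n) →
    ∀ dp, C1 dp → P2 n dp (len - 1) →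
    (C1 (l.foldl (fun dp i =>
        let j := i + len - 1
        match altBest dp i j with
        | some b => dp.insert (i, j) b
        | none => dp) dp) ∧
     P2 n (l.foldl (fun dp i =>
        let j := i + len - 1
        match altBest dp i j with
        | some b => dp.insert (i, j) b
        | none => dp) dp) (len - 1) ∧
     (∀ a ∈ l, ((l.foldl (fun dp i =>
        let j := i + len - 1
        match altBest dp i j with
        | some b => dp.insert (i, j) b
        | none => dp) dp)[(a, a + len - 1)]?).isSome = true) ∧
     (∀ k : Int × Int, (dp[k]?).isSome = true → ((l.foldl (fun dp i =>
        let j := i + len - 1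
        match altBest dp i j with
        | some b => dp.insert (i, j) b
        | none => dp) dp)[k]?).isSome = true)) := by
  intro l
  induction l with
  | nil => intro _ dp hc hp; exact ⟨hc, hp, by simp, fun k hk => hk⟩
  | cons i t iht =>
    intro hmems dp hc hp
    obtain ⟨hi1, hin⟩ := hmems i (by simp)
    have hij : i < i + len - 1 := by omega
    have hbest : altBest dp i (i + len - 1) = some (F i (i + len - 1)) := by
      apply altBest_eq n dp i (i + len - 1) hi1 hij (by omega) hc
      intro a b ha hab hbn hlt
      exact hp a b ha hab hbn (by omega)
    simp only [List.foldl_cons, hbest]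
    set dp' := dp.insert (i, i + len - 1) (F i (i + len - 1)) with hdp'
    have hins : ∀ q : Int × Int, (dp[q]?).isSome = true → (dp'[q]?).isSome = true := by
      intro q hq
      rw [hdp', Std.HashMap.getElem?_insert]
      split
      · rfl
      · exact hq
    have hc' : C1 dp' := by
      intro a b v hv
      rw [hdp', Std.HashMap.getElem?_insert] at hv
      split at hv
      · rename_i heq
        rw [beq_iff_eq] at heq
        cases hv
        have ha : a = i := (congrArg Prod.fst heq).symm
        have hb : b = i + len - 1 := (congrArg Prod.snd heq).symm
        rw [ha, hb]
      · exact hc a b v hv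
    have hp' : P2 n dp' (len - 1) := fun a b ha hab hbn hl => hins _ (hp a b ha hab hbn hl)
    obtain ⟨c1, c2, c3, c4⟩ := iht (fun g hg => hmems g (by simp [hg])) dp' hc' hp'
    refine ⟨c1, c2, ?_, fun q hq => c4 q (hins q hq)⟩
    intro a ha
    rcases List.mem_cons.mp ha with rfl | hat
    · apply c4
      rw [hdp', Std.HashMap.getElem?_insert]
      simp
    · exact c3 a hat

lemma B_lenloop (n : Int) : ∀ (k : Nat) (L : Int), (n + 1 - L).toNat = k → 2 ≤ L →
    ∀ dp, C1 dp → P2 n dp (L - 1) →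
    (C1 ((PySem.List.pyRange L (n + 1) 1).foldl
        (fun dp len =>
          (PySem.List.pyRange 1 (n - len + 2) 1).foldl
            (fun dp i =>
              let j := i + len - 1
              match altBest dp i j with
              | some b => dp.insert (i, j) b
              | none => dp) dp) dp) ∧
     P2 n ((PySem.List.pyRange L (n + 1) 1).foldl
        (fun dp len =>
          (PySem.List.pyRange 1 (n - len + 2) 1).foldl
            (fun dp i =>
              let j := i + len - 1
              match altBest dp i j with
              | some b => dp.insert (i, j) b
              | none => dp) dp) dp) n) := by
  intro k
  induction k with
  | zero =>
    intro L hL h2 dp hc hp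
    rw [PySem.List.pyRange_one_eq_nil (by omega : n + 1 ≤ L)]
    simp only [List.foldl_nil]
    exact ⟨hc, fun a b ha hab hbn hl => hp a b ha hab hbn (by omega)⟩
  | succ k ihk =>
    intro L hL h2 dp hc hp
    rw [PySem.List.pyRange_one_cons (by omega : L < n + 1)]
    simp only [List.foldl_cons]
    have hmems : ∀ i ∈ PySem.List.pyRange 1 (n - L + 2) 1, 1 ≤ i ∧ i + L - 1 ≤ n := by
      intro i hi; rw [PySem.List.mem_pyRange_one] at hi; omega
    obtain ⟨c1, c2, c3, c4⟩ := B_iloop n L h2 _ hmems dp hc hp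
    refine ihk (L + 1) (by omega) (by omega) _ c1 ?_
    intro a b ha hab hbn hl
    by_cases hsmall : b - a + 1 ≤ L - 1
    · exact c2 a b ha hab hbn hsmall
    · have hbeq : b = a + L - 1 := by omega
      rw [hbeq]
      apply c3
      rw [PySem.List.mem_pyRange_one]
      omega

lemma B_eq_F (n : Int) : guess_number_higher_lower_memoization_alt n = F 1 n := by
  unfold guess_number_higher_lower_memoization_alt
  by_cases h2 : n < 2
  · rw [PySem.List.pyRange_one_eq_nil (by omega : n + 1 ≤ 2)]
    simp only [List.foldl_nil]
    rw [Std.HashMap.getD_eq_getD_getElem?, Std.HashMap.getElem?_empty, Option.getD_none, F_of_ge _ _ (by omega)]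
  · have hc0 : C1 ((∅ : Std.HashMap (Int × Int) Int) : Std.HashMap (Int × Int) Int) := by
      intro a b v hv
      rw [Std.HashMap.getElem?_empty] at hv
      cases hv
    have hp0 : P2 n ((∅ : Std.HashMap (Int × Int) Int) : Std.HashMap (Int × Int) Int) (2 - 1) := by
      intro a b ha hab hbn hl
      exact absurd hl (by omega)
    obtain ⟨c1, c2⟩ := B_lenloop n (n + 1 - 2).toNat 2 rfl (by omega) (∅ : Std.HashMap (Int × Int) Int) hc0 hp0
    have key : ∀ (d : Std.HashMap (Int × Int) Int), C1 d →
        (d[((1 : Int), n)]?).isSome = true → d.getD (1, n) 0 = F 1 n := by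
      intro d hcd hs
      obtain ⟨v, hv⟩ := Option.isSome_iff_exists.mp hs
      rw [Std.HashMap.getD_eq_getD_getElem?, hv, Option.getD_some]
      exact hcd 1 n v hv
    exact key _ c1 (c2 1 n (le_refl 1) (by omega) (le_refl n) (by omega))

lemma A_eq_F (n : Int) : guess_number_higher_lower_memoization n = F 1 n := by
  unfold guess_number_higher_lower_memoization
  have hg : GoodA ((∅ : Std.HashMap (Int × Int) Int) : Std.HashMap (Int × Int) Int) := by
    intro a b v hv
    rw [Std.HashMap.getElem?_empty] at hv
    cases hv
  exact (A_main ((n - 1).toNat + 1) 1 n (∅ : Std.HashMap (Int × Int) Int) hg (by omega)).1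

-- ===== VERDICT (by name: the statement is the Claim_ definition above) =====
theorem guess_number_higher_lower_memoization_spec : Claim_equal_guess_number_higher_lower_memoization := by
  intro n _ _
  unfold Spec_guess_number_higher_lower_memoization
  rw [A_eq_F, B_eq_F]
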